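-- pv_equiv track=rewrite | github.com/jihwan0123/Algorithm | SWEA/D3/swea_1225.py | makePassword
-- ===== SOURCE A (Python) =====
-- def makePassword(nums):
--     queue = list(nums)
--     level = 0
--     while True:
--         level += 1
--         a = queue.pop(0)
--         if a - level <= 0:
--             queue.append(0)
--             return queue
--         queue.append(a - level)
--         if level >= 5:
--             level = 0
--     return
-- ===== SOURCE B (Python) =====
-- def makePassword(nums):
--     # Batch whole 5*n-step periods of the queue process arithmetically: period j
--     # subtracts S[i] from element i, so skip the maximal safe number of whole
--     # periods in closed form and simulate only the short remainder.
--     # Return value only; the argument is never mutated (A copies it too).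
--     n = len(nums)
--     S = [5 + sum((i + j * n) % 5 for j in range(5)) for i in range(n)]
--     ks = [(v - 1) // s for v, s in zip(nums, S)]
--     k = max(0, min(ks)) if ks else 0
--     queue = [v - k * s for v, s in zip(nums, S)]
--     t = 0
--     while True:
--         a = queue.pop(0)
--         lvl = t % 5 + 1
--         t += 1
--         if a <= lvl:
--             queue.append(0)
--             return queue
--         queue.append(a - lvl)
-- ===== Notes on version B (the rewrite author's own statement) =====
-- stated objective: alternative
-- what changed: A simulates the queue one pop at a time until some element reaches zero; B computes arithmetically how much one full 5*n-step period subtracts from each element, skips the maximal safe number of whole periods in closed form, and simulates only the short remainder (a better bound in the value magnitude, though not measurably faster on a timing run's inputs, where A often exits early).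
import Mathlib
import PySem

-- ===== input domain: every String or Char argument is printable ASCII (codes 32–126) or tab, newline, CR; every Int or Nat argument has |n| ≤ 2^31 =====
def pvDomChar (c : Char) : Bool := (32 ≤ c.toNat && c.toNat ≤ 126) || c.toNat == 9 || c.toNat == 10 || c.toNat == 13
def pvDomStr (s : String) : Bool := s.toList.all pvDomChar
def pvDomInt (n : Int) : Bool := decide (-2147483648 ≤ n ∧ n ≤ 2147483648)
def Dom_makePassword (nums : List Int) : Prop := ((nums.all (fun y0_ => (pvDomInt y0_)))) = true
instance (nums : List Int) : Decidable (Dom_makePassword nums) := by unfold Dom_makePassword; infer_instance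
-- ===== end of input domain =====

-- B batches whole 5·n-step periods of A's queue loop arithmetically (each period
-- subtracts a fixed amount per element) and simulates only the remainder; return
-- value only (neither program mutates its argument).

-- ===== PORT A =====
-- measure used only for termination of the port's recursion
def pvPosSum (q : List Int) : Int := (q.map (fun a => max a 0)).sum

lemma pvPosSum_nonneg (q : List Int) : 0 ≤ pvPosSum q := by
  induction q with
  | nil => simp [pvPosSum]
  | cons a q ih =>
    simp only [pvPosSum, List.map_cons, List.sum_cons] at *
    have := le_max_right a (0 : Int)
    omega

-- the while-loop of A: queue rotation, level cycles 1..5 (Python's `level` int is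
-- carried as the Nat state `lvl`, identical values 0..4 on all reachable states)
def runA : List Int → Nat → List Int
  | [], _ => []
  | a :: q, lvl =>
    if a - (lvl + 1 : Int) ≤ 0 then q ++ [(0 : Int)]
    else runA (q ++ [a - (lvl + 1 : Int)]) (if 5 ≤ lvl + 1 then 0 else lvl + 1)
termination_by q _ => (pvPosSum q).toNat
decreasing_by
  rename_i h
  have hq := pvPosSum_nonneg q
  have h1 : pvPosSum (q ++ [a - (lvl + 1 : Int)]) = pvPosSum q + (a - (lvl + 1 : Int)) := by
    simp only [pvPosSum, List.map_append, List.sum_append, List.map_cons, List.map_nil,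
      List.sum_cons, List.sum_nil]
    have : max (a - (lvl + 1 : Int)) 0 = a - (lvl + 1 : Int) := max_eq_left (by omega)
    omega
  have h2 : pvPosSum (a :: q) = max a 0 + pvPosSum q := by
    simp [pvPosSum]
  have ha : max a (0 : Int) = a := max_eq_left (by omega)
  omega

def makePassword (nums : List Int) : List Int := runA nums 0

-- ===== PORT B =====
-- remainder simulation of B (Source B's trailing while-loop: step counter t,
-- level recomputed as t % 5 + 1, no reset variable)
def runB : List Int → Nat → List Int
  | [], _ => []
  | a :: q, t =>
    if a ≤ ((t % 5 : Nat) : Int) + 1 then q ++ [(0 : Int)]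
    else runB (q ++ [a - (((t % 5 : Nat) : Int) + 1)]) (t + 1)
termination_by q _ => (pvPosSum q).toNat
decreasing_by
  rename_i h
  have hq := pvPosSum_nonneg q
  have h1 : pvPosSum (q ++ [a - (((t % 5 : Nat) : Int) + 1)])
      = pvPosSum q + (a - (((t % 5 : Nat) : Int) + 1)) := by
    simp only [pvPosSum, List.map_append, List.sum_append, List.map_cons, List.map_nil,
      List.sum_cons, List.sum_nil]
    have : max (a - (((t % 5 : Nat) : Int) + 1)) 0 = a - (((t % 5 : Nat) : Int) + 1) :=
      max_eq_left (by omega)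
    omega
  have h2 : pvPosSum (a :: q) = max a 0 + pvPosSum q := by
    simp [pvPosSum]
  have ha : max a (0 : Int) = a := max_eq_left (by omega)
  omega

def makePassword_alt (nums : List Int) : List Int :=
  let n := nums.length
  let S : List Int :=
    (List.range n).map (fun i =>
      (5 : Int) + ((List.range 5).map (fun j => (((i + j * n) % 5 : Nat) : Int))).sum)
  let ks : List Int := List.zipWith (fun v s => PySem.Int.floordiv (v - 1) s) nums S
  let k : Int := max 0 ((PySem.List.min? ks (fun y => y)).getD 0)
  let queue : List Int := List.zipWith (fun v s => v - k * s) nums S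
  runB queue 0

-- ===== PRECONDITION & SPEC =====
-- Pre_ excludes only the empty list, on which Python A raises IndexError (pop from empty list).
def Pre_makePassword (nums : List Int) : Prop := nums ≠ []
instance (nums : List Int) : Decidable (Pre_makePassword nums) := by unfold Pre_makePassword; infer_instance
def pvWitness_makePassword : List Int := [17, 3, 42]

def Spec_makePassword (nums : List Int) (out : List Int) : Prop := out = makePassword_alt nums
instance (nums : List Int) (out : List Int) : Decidable (Spec_makePassword nums out) := by unfold Spec_makePassword; infer_instance

-- ===== CLAIM (what is proved, stated in full; the proofs are below) =====
def Claim_equal_makePassword : Prop := ∀ (nums : List Int), Dom_makePassword nums → Pre_makePassword nums → Spec_makePassword nums (makePassword nums)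

-- ===== LEMMAS AND PROOFS =====

lemma runB_eq_runA (q : List Int) (t : Nat) : runB q t = runA q (t % 5) := by
  induction q, t using runB.induct with
  | case1 t => rw [runB, runA]
  | case2 a q t h =>
    rw [runB, runA, if_pos h, if_pos (by omega)]
  | case3 a q t h ih =>
    rw [runB, runA, if_neg h, if_neg (by omega), ih]
    congr 1
    split <;> omega

-- the per-element subtraction one full rotation (n steps) of A's loop performs
def pvSub : List Int → Nat → List Int
  | [], _ => []
  | a :: q, lvl => (a - (lvl + 1 : Int)) :: pvSub q (if 5 ≤ lvl + 1 then 0 else lvl + 1)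

lemma pvSub_length (q : List Int) : ∀ lvl, (pvSub q lvl).length = q.length := by
  induction q with
  | nil => intro lvl; rfl
  | cons a q ih => intro lvl; simp [pvSub, ih]

lemma pvSub_get (q : List Int) : ∀ (lvl i : Nat) (_h5 : lvl < 5) (hi : i < q.length),
    (pvSub q lvl)[i]'(by rw [pvSub_length]; exact hi)
      = q[i] - ((((lvl + i) % 5 + 1 : Nat)) : Int) := by
  induction q with
  | nil => intro lvl i h5 hi; simp at hi
  | cons a q ih =>
    intro lvl i h5 hi
    cases i with
    | zero => simp [pvSub, Nat.mod_eq_of_lt h5]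
    | succ i =>
      have h5' : (if 5 ≤ lvl + 1 then 0 else lvl + 1) < 5 := by split <;> omega
      have hi' : i < q.length := by simpa using hi
      have := ih (if 5 ≤ lvl + 1 then 0 else lvl + 1) i h5' hi'
      simp only [pvSub, List.getElem_cons_succ]
      rw [this]
      congr 2
      split <;> omega

lemma runA_steps : ∀ (u w : List Int) (lvl : Nat), lvl < 5 →
    (∀ x ∈ pvSub u lvl, 0 < x) →
    runA (u ++ w) lvl = runA (w ++ pvSub u lvl) ((lvl + u.length) % 5) := by
  intro u
  induction u with
  | nil =>
    intro w lvl h5 _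
    simp [pvSub, Nat.mod_eq_of_lt h5]
  | cons a u ih =>
    intro w lvl h5 hpos
    have hpos0 : 0 < a - (lvl + 1 : Int) := hpos _ (by simp [pvSub])
    have hstep : runA ((a :: u) ++ w) lvl
        = runA ((u ++ w) ++ [a - (lvl + 1 : Int)]) (if 5 ≤ lvl + 1 then 0 else lvl + 1) := by
      rw [List.cons_append, runA, if_neg (by omega)]
    rw [hstep, List.append_assoc]
    have h5' : (if 5 ≤ lvl + 1 then 0 else lvl + 1) < 5 := by split <;> omega
    rw [ih (w ++ [a - (lvl + 1 : Int)]) _ h5'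
      (by intro x hx; exact hpos x (by simp [pvSub] at hx ⊢; tauto))]
    congr 1
    · rw [List.append_assoc]
      simp [pvSub]
    · simp only [List.length_cons]
      split <;> omega

def pvLv (n i j : Nat) : Int := (((i + j * n) % 5 : Nat) : Int) + 1

def pvCum (n i : Nat) : Nat → Int
  | 0 => 0
  | r + 1 => pvCum n i r + pvLv n i r

def pvCum5 (n i : Nat) : Int := pvCum n i 5

def pvDec (k : Nat) (x : List Int) : List Int :=
  x.mapIdx (fun i a => a - (k : Int) * pvCum5 x.length i)

-- B's per-element period subtraction list, as makePassword_alt computes it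
def pvS (n : Nat) : List Int :=
  (List.range n).map (fun i =>
    (5 : Int) + ((List.range 5).map (fun j => (((i + j * n) % 5 : Nat) : Int))).sum)

lemma pvLv_bounds (n i j : Nat) : 1 ≤ pvLv n i j ∧ pvLv n i j ≤ 5 := by
  unfold pvLv; omega

lemma pvCum_succ (n i r : Nat) : pvCum n i (r + 1) = pvCum n i r + pvLv n i r := rfl

lemma pvCum_zero (n i : Nat) : pvCum n i 0 = 0 := rfl

lemma pvCum_mono (n i : Nat) : ∀ a b : Nat, a ≤ b → pvCum n i a ≤ pvCum n i b := by
  intro a b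
  induction b with
  | zero => intro h; interval_cases a; exact le_refl _
  | succ b ih =>
    intro h
    rcases Nat.lt_or_ge a (b + 1) with h' | h'
    · have := ih (by omega)
      have := (pvLv_bounds n i b).1
      rw [pvCum_succ]; omega
    · have : a = b + 1 := by omega
      rw [this]

lemma pvCum5_expand (n i : Nat) :
    pvCum5 n i = pvLv n i 0 + pvLv n i 1 + pvLv n i 2 + pvLv n i 3 + pvLv n i 4 := by
  show pvCum n i 5 = _
  rw [show (5 : Nat) = 4 + 1 from rfl, pvCum_succ,
      show (4 : Nat) = 3 + 1 from rfl, pvCum_succ,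
      show (3 : Nat) = 2 + 1 from rfl, pvCum_succ,
      show (2 : Nat) = 1 + 1 from rfl, pvCum_succ,
      show (1 : Nat) = 0 + 1 from rfl, pvCum_succ, pvCum_zero]
  ring

lemma pvCum5_pos (n i : Nat) : 0 < pvCum5 n i := by
  rw [pvCum5_expand]
  have h0 := pvLv_bounds n i 0
  have h1 := pvLv_bounds n i 1
  have h2 := pvLv_bounds n i 2
  have h3 := pvLv_bounds n i 3
  have h4 := pvLv_bounds n i 4
  omega

lemma pvDec_length (k : Nat) (x : List Int) : (pvDec k x).length = x.length := by
  simp [pvDec]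

lemma pvDec_get (k : Nat) (x : List Int) (i : Nat) (hi : i < x.length) :
    (pvDec k x)[i]'(by rw [pvDec_length]; exact hi)
      = x[i] - (k : Int) * pvCum5 x.length i := by
  simp [pvDec]

lemma pvDec_zero (x : List Int) : pvDec 0 x = x := by
  apply List.ext_getElem (by rw [pvDec_length])
  intro i h1 h2
  rw [pvDec_get 0 x i h2]
  simp

lemma pvS_length (n : Nat) : (pvS n).length = n := by simp [pvS]

lemma pvS_get (n i : Nat) (hi : i < n) :
    (pvS n)[i]'(by rw [pvS_length]; exact hi) = pvCum5 n i := by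
  simp only [pvS, List.getElem_map, List.getElem_range]
  rw [show List.range 5 = [0, 1, 2, 3, 4] from by decide]
  simp only [List.map_cons, List.map_nil, List.sum_cons, List.sum_nil]
  rw [pvCum5_expand]
  simp only [pvLv]
  push_cast
  omega

-- the r-fold round iteration of A's loop (phases (r·n) % 5)
def pvIter (n : Nat) (x : List Int) : Nat → List Int
  | 0 => x
  | r + 1 => pvSub (pvIter n x r) ((r * n) % 5)

lemma pvIter_length (n : Nat) (x : List Int) : ∀ r, (pvIter n x r).length = x.length := by
  intro r
  induction r with
  | zero => rfl
  | succ r ih => rw [pvIter, pvSub_length, ih]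

lemma pvIter_get (n : Nat) (x : List Int) (_hx : x.length = n) :
    ∀ (r i : Nat) (hi : i < x.length),
      (pvIter n x r)[i]'(by rw [pvIter_length]; exact hi) = x[i] - pvCum n i r := by
  intro r
  induction r with
  | zero => intro i hi; simp [pvIter, pvCum_zero]
  | succ r ih =>
    intro i hi
    have hlen : i < (pvIter n x r).length := by rw [pvIter_length]; exact hi
    have hsub := pvSub_get (pvIter n x r) ((r * n) % 5) i (by omega) hlen
    show (pvSub (pvIter n x r) ((r * n) % 5))[i]'_ = _
    refine hsub.trans ?_
    rw [ih i hi]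
    simp only [pvCum_succ, pvLv]
    push_cast
    omega

lemma runA_iter (x : List Int)
    (h : ∀ (i : Nat) (hi : i < x.length), pvCum5 x.length i + 1 ≤ x[i]) :
    ∀ r : Nat, r ≤ 5 → runA x 0 = runA (pvIter x.length x r) ((r * x.length) % 5) := by
  intro r
  induction r with
  | zero => intro _; simp [pvIter]
  | succ r ih =>
    intro hr5
    rw [ih (by omega)]
    have hpos : ∀ z ∈ pvSub (pvIter x.length x r) ((r * x.length) % 5), 0 < z := by
      intro z hz
      rw [List.mem_iff_getElem] at hz
      obtain ⟨i, hi, rfl⟩ := hz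
      have hi' : i < x.length := by
        rw [pvSub_length, pvIter_length] at hi; exact hi
      have : (pvSub (pvIter x.length x r) ((r * x.length) % 5))[i]'hi
          = (pvIter x.length x (r + 1))[i]'(by rw [pvIter_length]; exact hi') := rfl
      rw [this, pvIter_get x.length x rfl (r + 1) i hi']
      have hmono := pvCum_mono x.length i (r + 1) 5 (by omega)
      have hh := h i hi'
      rw [pvCum5] at hh
      omega
    have hstep := runA_steps (pvIter x.length x r) [] ((r * x.length) % 5)
      (by omega) hpos
    simp only [List.append_nil, List.nil_append] at hstep
    rw [hstep]
    show runA (pvIter x.length x (r + 1)) _ = runA (pvIter x.length x (r + 1)) _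
    congr 1
    rw [pvIter_length, Nat.succ_mul]
    omega

lemma runA_period (x : List Int)
    (h : ∀ (i : Nat) (hi : i < x.length), pvCum5 x.length i + 1 ≤ x[i]) :
    runA x 0 = runA (pvDec 1 x) 0 := by
  have h5 := runA_iter x h 5 (le_refl 5)
  have hph : (5 * x.length) % 5 = 0 := by omega
  rw [hph] at h5
  rw [h5]
  congr 1
  apply List.ext_getElem (by rw [pvIter_length, pvDec_length])
  intro i h1 h2
  have hi : i < x.length := by rw [pvIter_length] at h1; exact h1
  rw [pvIter_get x.length x rfl 5 i hi, pvDec_get 1 x i hi, pvCum5]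
  push_cast
  ring

lemma runA_skip : ∀ (k : Nat) (x : List Int),
    (∀ (i : Nat) (hi : i < x.length), (k : Int) * pvCum5 x.length i + 1 ≤ x[i]) →
    runA x 0 = runA (pvDec k x) 0 := by
  intro k
  induction k with
  | zero => intro x _; rw [pvDec_zero]
  | succ k ih =>
    intro x h
    have hc : ∀ (i : Nat) (hi : i < x.length), pvCum5 x.length i + 1 ≤ x[i] := by
      intro i hi
      have := h i hi
      have hpos := pvCum5_pos x.length i
      have : (0 : Int) ≤ (k : Int) * pvCum5 x.length i :=
        mul_nonneg (by positivity) (le_of_lt hpos)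
      push_cast at *
      nlinarith
    rw [runA_period x hc]
    rw [ih (pvDec 1 x) ?_]
    · congr 1
      apply List.ext_getElem (by rw [pvDec_length, pvDec_length, pvDec_length])
      intro i h1 h2
      have hi : i < x.length := by rw [pvDec_length, pvDec_length] at h1; exact h1
      have hi1 : i < (pvDec 1 x).length := by rw [pvDec_length]; exact hi
      rw [pvDec_get k (pvDec 1 x) i hi1, pvDec_get 1 x i hi,
          pvDec_get (k + 1) x i hi, pvDec_length]
      push_cast
      ring
    · intro i hi1
      have hi : i < x.length := by rw [pvDec_length] at hi1; exact hi1
      rw [pvDec_get 1 x i hi, pvDec_length]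
      have := h i hi
      push_cast at *
      nlinarith [pvCum5_pos x.length i]

lemma makePassword_eq (nums : List Int) : makePassword nums = makePassword_alt nums := by
  show runA nums 0
      = runB (List.zipWith
          (fun v s => v - (max 0 ((PySem.List.min?
              (List.zipWith (fun v s => PySem.Int.floordiv (v - 1) s) nums (pvS nums.length))
              (fun y => y)).getD 0)) * s)
          nums (pvS nums.length)) 0
  rw [runB_eq_runA]
  norm_num
  set n := nums.length with hn
  set ks := List.zipWith (fun v s => PySem.Int.floordiv (v - 1) s) nums (pvS n) with hks
  set k : Int := max 0 ((PySem.List.min? ks (fun y => y)).getD 0) with hk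
  have hk0 : (0 : Int) ≤ k := le_max_left 0 _
  have hqueue : List.zipWith (fun v s => v - k * s) nums (pvS n) = pvDec k.toNat nums := by
    apply List.ext_getElem (by rw [List.length_zipWith, pvS_length, pvDec_length]; omega)
    intro i h1 h2
    have hi : i < n := by rw [pvDec_length] at h2; exact h2
    rw [List.getElem_zipWith, pvDec_get k.toNat nums i hi, pvS_get n i hi,
        Int.toNat_of_nonneg hk0]
  rw [hqueue]
  by_cases hk1 : k = 0
  · rw [hk1]
    show runA nums 0 = runA (pvDec (0 : Int).toNat nums) 0
    rw [show (0 : Int).toNat = 0 from rfl, pvDec_zero]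
  · have hkpos : (0 : Int) < k := lt_of_le_of_ne hk0 (Ne.symm hk1)
    apply runA_skip
    intro i hi
    rw [Int.toNat_of_nonneg hk0]
    cases hmin : PySem.List.min? ks (fun y => y) with
    | none => rw [hk, hmin] at hkpos; simp at hkpos
    | some m =>
      have hkm : k = max 0 m := by rw [hk, hmin]; rfl
      have hm : k = m := by rw [hkm]; rw [hkm] at hkpos; omega
      have hkslen : ks.length = n := by
        rw [hks, List.length_zipWith, pvS_length]; omega
      have hiks : i < ks.length := by omega
      have hmem : ks[i] ∈ ks := List.getElem_mem hiks
      have hle : m ≤ ks[i] := PySem.List.min?_isMin hmin ks[i] hmem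
      have hval : ks[i] = PySem.Int.floordiv (nums[i] - 1) (pvCum5 n i) := by
        show (List.zipWith (fun v s => PySem.Int.floordiv (v - 1) s) nums
            (pvS n))[i]'(by rw [List.length_zipWith, pvS_length]; omega) = _
        rw [List.getElem_zipWith, pvS_get n i hi]
      have hcpos : (0 : Int) < pvCum5 n i := pvCum5_pos n i
      rw [hval] at hle
      have hmul : m * pvCum5 n i ≤ nums[i] - 1 :=
        (PySem.Int.le_floordiv_iff_mul_le hcpos).mp hle
      rw [hm]
      linarith

-- ===== VERDICT (by name: the statement is the Claim_ definition above) =====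
theorem makePassword_spec : Claim_equal_makePassword := by
  intro nums _ _
  show makePassword nums = makePassword_alt nums
  exact makePassword_eq nums
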